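-- pv_equiv track=rewrite | github.com/Thanatoz-1/EmotionStimuli | src/emotion/utils/utils.py | conv2span
-- ===== SOURCE A (Python) =====
-- def conv2span(brown):
--     spans = []
--     span = {}
--     tags = [tup[1] for tup in brown]
--     for i in range(len(tags)):
--         tag = tags[i]  # IOB tag
--         if i == 0:
--             span[i] = tag
--         elif tag == "I" and span[i - 1] in ["B", "I"]:
--             span[i] = tag
--         elif tag == "O" and span[i - 1] == "O":
--             span[i] = tag
--         else:
--             spans.append(span)
--             span = {}
--             span[i] = tag
--
--         if i == len(tags) - 1:
--             spans.append(span)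
--         else:
--             pass
--     return spans
-- ===== SOURCE B (Python) =====
-- def conv2span(brown):
--     tags = [t for _, t in brown]
--     n = len(tags)
--     starts = [i for i in range(n)
--               if i == 0 or not ((tags[i] == "I" and tags[i - 1] in ("B", "I"))
--                                 or (tags[i] == "O" and tags[i - 1] == "O"))]
--     return [{j: tags[j] for j in range(s, e)}
--             for s, e in zip(starts, starts[1:] + [n])]
-- ===== Notes on version B (the rewrite author's own statement) =====
-- stated objective: alternative
-- what changed: Replaces A's single stateful loop, which grows a current-span dict and decides continuation by reading the previous tag back out of that dict, with a two-pass decomposition: first compute the list of span start indices from the tag list alone, then zip consecutive starts and materialise each span by a range comprehension.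
import Mathlib
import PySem

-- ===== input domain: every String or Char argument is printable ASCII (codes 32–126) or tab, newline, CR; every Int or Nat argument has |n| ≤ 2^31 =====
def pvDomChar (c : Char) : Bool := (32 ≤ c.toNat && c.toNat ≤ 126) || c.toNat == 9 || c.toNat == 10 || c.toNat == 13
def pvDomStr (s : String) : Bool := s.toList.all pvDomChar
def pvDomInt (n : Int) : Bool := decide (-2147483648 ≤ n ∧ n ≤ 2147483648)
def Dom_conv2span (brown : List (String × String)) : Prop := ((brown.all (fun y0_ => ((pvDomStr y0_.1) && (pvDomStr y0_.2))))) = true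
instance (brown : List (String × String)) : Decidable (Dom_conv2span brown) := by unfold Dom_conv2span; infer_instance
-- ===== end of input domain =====

-- B groups IOB tokens by first listing span start indices, then pairing consecutive starts (objective: alternative decomposition, same O(n) cost).

-- ===== PORT A =====
-- Transliteration of A's single loop: state = (finished spans, current span as a Python dict).
-- tags[i] is always in range here, so `.getD ""` only unwraps the Option; span[i-1] is always a
-- present key when Python reads it, so Dict.getD matches Python's span[i-1] lookup exactly.
def conv2span (brown : List (String × String)) : List (List (Int × String)) :=
  let tags : List String := brown.map (fun tup => tup.2)
  let n : Int := (tags.length : Int)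
  (((PySem.List.pyRange 0 n).foldl
      (fun (st : List (List (Int × String)) × PySem.Dict Int String) (i : Int) =>
        let tag : String := (PySem.List.pyGet? tags i).getD ""
        let st' :=
          if i == 0 then (st.1, st.2.insert i tag)
          else if tag == "I" && (st.2.getD (i-1) "" == "B" || st.2.getD (i-1) "" == "I") then
            (st.1, st.2.insert i tag)
          else if tag == "O" && st.2.getD (i-1) "" == "O" then
            (st.1, st.2.insert i tag)
          else (st.1 ++ [st.2.items], (PySem.Dict.empty).insert i tag)
        if i == n - 1 then (st'.1 ++ [st'.2.items], st'.2) else st')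
      ([], PySem.Dict.empty))).1

-- ===== PORT B =====
-- Transliteration of B: start indices by a filter over range(n), then consecutive starts zipped
-- and each span materialised as a dict comprehension over range(start, end).
def conv2span_alt (brown : List (String × String)) : List (List (Int × String)) :=
  let tags : List String := brown.map (fun tup => tup.2)
  let n : Int := (tags.length : Int)
  let tagAt : Int → String := fun j => (PySem.List.pyGet? tags j).getD ""
  let starts : List Int := (PySem.List.pyRange 0 n).filter (fun i =>
    i == 0 || !((tagAt i == "I" && (tagAt (i-1) == "B" || tagAt (i-1) == "I")) ||
                (tagAt i == "O" && tagAt (i-1) == "O")))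
  (starts.zip (PySem.List.slice starts (some 1) ++ [n])).map
    (fun se => (((PySem.List.pyRange se.1 se.2).foldl
        (fun (d : PySem.Dict Int String) j => d.insert j (tagAt j)) PySem.Dict.empty)).items)

-- ===== PRECONDITION & SPEC =====
def Spec_conv2span (brown : List (String × String)) (out : List (List (Int × String))) : Prop := out = conv2span_alt brown
instance (brown : List (String × String)) (out : List (List (Int × String))) : Decidable (Spec_conv2span brown out) := by unfold Spec_conv2span; infer_instance

-- ===== CLAIM (what is proved, stated in full; the proofs are below) =====
def Claim_equal_conv2span : Prop := ∀ (brown : List (String × String)), Dom_conv2span brown → Spec_conv2span brown (conv2span brown)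

-- ===== LEMMAS AND PROOFS =====

-- tags[j] as both ports read it
def tagA (tags : List String) (j : Int) : String := (PySem.List.pyGet? tags j).getD ""

-- "token i continues the previous token": the boolean both ports branch on
def contB (tags : List String) (i : Int) : Bool :=
  (tagA tags i == "I" && (tagA tags (i-1) == "B" || tagA tags (i-1) == "I")) ||
  (tagA tags i == "O" && tagA tags (i-1) == "O")

-- the span covering indices [a, b)
def segL (tags : List String) (a b : Int) : List (Int × String) :=
  (PySem.List.pyRange a b).map (fun j => (j, tagA tags j))

-- A's loop body without the trailing "last index" append
def stepA (tags : List String)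
    (st : List (List (Int × String)) × PySem.Dict Int String) (i : Int) :
    List (List (Int × String)) × PySem.Dict Int String :=
  let tag : String := (PySem.List.pyGet? tags i).getD ""
  if i == 0 then (st.1, st.2.insert i tag)
  else if tag == "I" && (st.2.getD (i-1) "" == "B" || st.2.getD (i-1) "" == "I") then
    (st.1, st.2.insert i tag)
  else if tag == "O" && st.2.getD (i-1) "" == "O" then
    (st.1, st.2.insert i tag)
  else (st.1 ++ [st.2.items], (PySem.Dict.empty).insert i tag)

def startsL (tags : List String) (m : Int) : List Int :=
  (PySem.List.pyRange 0 m).filter (fun i => i == 0 || !(contB tags i))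

def runA (tags : List String) : List (List (Int × String)) :=
  let n : Int := (tags.length : Int)
  (((PySem.List.pyRange 0 n).foldl
      (fun st i => let st' := stepA tags st i
                   if i == n - 1 then (st'.1 ++ [st'.2.items], st'.2) else st')
      ([], PySem.Dict.empty))).1

def runB (tags : List String) : List (List (Int × String)) :=
  let n : Int := (tags.length : Int)
  let starts := startsL tags n
  (starts.zip (PySem.List.slice starts (some 1) ++ [n])).map
    (fun se => (((PySem.List.pyRange se.1 se.2).foldl
        (fun (d : PySem.Dict Int String) j => d.insert j (tagA tags j)) PySem.Dict.empty)).items)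

theorem pyRange_nil {a b : Int} (h : b ≤ a) : PySem.List.pyRange a b = [] := by
  rw [List.eq_nil_iff_forall_not_mem]
  intro x hx
  rw [PySem.List.mem_pyRange_one] at hx
  omega

theorem get?_segL (tags : List String) (k : Nat) :
    ∀ (a j : Int), a ≤ j → j < a + (k : Int) →
      (PySem.Dict.mk (segL tags a (a + (k : Int)))).get? j = some (tagA tags j) := by
  induction k with
  | zero => intro a j h1 h2; omega
  | succ k ih =>
    intro a j h1 h2
    rw [segL, (by push_cast; ring : a + (((k+1):Nat):Int) = a + ((k:Int)+1))]
    rw [PySem.List.pyRange_one_cons (by omega : a < a + ((k:Nat)+1)), List.map_cons,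
      PySem.Dict.get?_mk_cons]
    by_cases hj : j = a
    · simp [hj]
    · rw [if_neg (by simp; exact fun h => hj h.symm)]
      have := ih (a+1) j (by omega) (by omega)
      rw [segL] at this
      rw [(by omega : a + ((k:Int) + 1) = a + 1 + (k:Int))]
      exact this

theorem contains_segL (tags : List String) {a b j : Int} (h : b ≤ j) :
    (PySem.Dict.mk (segL tags a b)).contains j = false := by
  rw [PySem.Dict.contains.eq_1, List.any_eq_false]
  intro p hp
  simp only [segL, List.mem_map] at hp
  obtain ⟨i, hi, rfl⟩ := hp
  rw [PySem.List.mem_pyRange_one] at hi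
  simp
  omega

theorem getD_segL (tags : List String) {a b j : Int} (h1 : a ≤ j) (h2 : j < b) :
    (PySem.Dict.mk (segL tags a b)).getD j "" = tagA tags j := by
  rw [PySem.Dict.getD_eq_get?_getD]
  have : b = a + ((b - a).toNat : Int) := by omega
  rw [this] at h2 ⊢
  rw [get?_segL tags _ a j h1 h2]
  rfl

theorem insert_segL (tags : List String) {a b : Int} (h : a ≤ b) :
    (PySem.Dict.mk (segL tags a b)).insert b (tagA tags b) = PySem.Dict.mk (segL tags a (b + 1)) := by
  rw [PySem.Dict.insert.eq_def, contains_segL tags (le_refl b)]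
  simp only [Bool.false_eq_true, if_false]
  have : segL tags a (b+1) = segL tags a b ++ [(b, tagA tags b)] := by
    rw [segL, segL, PySem.List.pyRange_one_succ_right h, List.map_append, List.map_cons, List.map_nil]
  rw [this]

theorem empty_eq_segL (tags : List String) (a : Int) :
    (PySem.Dict.empty : PySem.Dict Int String) = PySem.Dict.mk (segL tags a a) := by
  rw [PySem.Dict.empty.eq_1]
  have : segL tags a a = [] := by rw [segL, pyRange_nil (le_refl a), List.map_nil]
  rw [this]

theorem zip_drop_snoc {α : Type} (l : List α) (s x : α) (h : l.getLast? = some s) :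
    l.zip (l.drop 1 ++ [x]) = l.zip (l.drop 1) ++ [(s, x)] := by
  induction l with
  | nil => simp at h
  | cons a t ih =>
    cases t with
    | nil => simp at h; subst h; simp
    | cons b t' =>
      rw [List.getLast?_cons_cons] at h
      have ihh := ih h
      simp only [List.drop_one, List.tail_cons] at ihh ⊢
      show (a, b) :: ((b :: t').zip (t' ++ [x])) = (a, b) :: ((b :: t').zip t' ++ [(s, x)])
      rw [ihh]

theorem dictfold_segL (tags : List String) (a b : Int) :
    (PySem.List.pyRange a b).foldl (fun (d : PySem.Dict Int String) j => d.insert j (tagA tags j))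
      PySem.Dict.empty = PySem.Dict.mk (segL tags a b) := by
  by_cases hab : a ≤ b
  · have : b = a + ((b - a).toNat : Int) := by omega
    rw [this]
    generalize (b - a).toNat = k
    clear hab this
    induction k with
    | zero => simpa using empty_eq_segL tags a
    | succ k ih =>
      push_cast
      rw [(by omega : a + ((k:Int)+1) = (a + (k:Int)) + 1),
        PySem.List.pyRange_one_succ_right (by omega : a ≤ a + (k:Int)), List.foldl_append]
      push_cast at ih
      rw [ih, List.foldl_cons, List.foldl_nil, insert_segL tags (by omega : a ≤ a + (k:Int))]
  · rw [pyRange_nil (by omega), List.foldl_nil]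
    have : segL tags a b = [] := by rw [segL, pyRange_nil (by omega), List.map_nil]
    rw [this, empty_eq_segL tags a]
    have : segL tags a a = [] := by rw [segL, pyRange_nil (le_refl a), List.map_nil]
    rw [this]

theorem stepA_at (tags : List String) (spans : List (List (Int × String))) {s i : Int}
    (h0 : 0 < i) (hs : s < i) :
    stepA tags (spans, PySem.Dict.mk (segL tags s i)) i =
      if contB tags i then (spans, PySem.Dict.mk (segL tags s (i + 1)))
      else (spans ++ [segL tags s i], PySem.Dict.mk (segL tags i (i + 1))) := by
  rw [stepA]
  have hne : (i == 0) = false := beq_eq_false_iff_ne.mpr (by omega)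
  have hget : (PySem.Dict.mk (segL tags s i)).getD (i-1) "" = tagA tags (i-1) :=
    getD_segL tags (by omega) (by omega)
  have htag : (PySem.List.pyGet? tags i).getD "" = tagA tags i := rfl
  simp only [htag, hne, Bool.false_eq_true, if_false, hget]
  by_cases h1 : (tagA tags i == "I" && (tagA tags (i-1) == "B" || tagA tags (i-1) == "I")) = true
  · have hc : contB tags i = true := by rw [contB, h1, Bool.true_or]
    simp only [h1, if_true, hc]
    rw [show (PySem.Dict.mk (segL tags s i)).insert i (tagA tags i)
          = PySem.Dict.mk (segL tags s (i+1)) from insert_segL tags (by omega)]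
  · by_cases h2 : (tagA tags i == "O" && tagA tags (i-1) == "O") = true
    · have hc : contB tags i = true := by rw [contB, h2, Bool.or_true]
      simp only [h1, h2, if_true, Bool.false_eq_true, if_false, hc]
      rw [show (PySem.Dict.mk (segL tags s i)).insert i (tagA tags i)
            = PySem.Dict.mk (segL tags s (i+1)) from insert_segL tags (by omega)]
    · have hc : contB tags i = false := by
        rw [contB]
        rw [Bool.or_eq_false_iff]
        constructor <;> [exact eq_false_of_ne_true h1; exact eq_false_of_ne_true h2]
      simp only [h1, h2, Bool.false_eq_true, if_false, hc]
      rw [empty_eq_segL tags i,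
        show (PySem.Dict.mk (segL tags i i)).insert i (tagA tags i)
          = PySem.Dict.mk (segL tags i (i+1)) from insert_segL tags (le_refl i)]

theorem startsL_succ (tags : List String) {n : Int} (h : 0 < n) :
    startsL tags (n + 1) = startsL tags n ++ (if contB tags n then [] else [n]) := by
  rw [startsL, startsL, PySem.List.pyRange_one_succ_right (by omega : (0:Int) ≤ n),
    List.filter_append]
  congr 1
  have hne : (n == 0) = false := beq_eq_false_iff_ne.mpr (by omega)
  by_cases hc : contB tags n = true
  · simp [List.filter, hne, hc]
  · simp [List.filter, hne, eq_false_of_ne_true hc]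

theorem invA (tags : List String) (m : Nat) :
    ∃ s : Int, (startsL tags ((m : Int) + 1)).getLast? = some s ∧ 0 ≤ s ∧ s ≤ (m : Int) ∧
      (PySem.List.pyRange 0 ((m : Int) + 1)).foldl (stepA tags) ([], PySem.Dict.empty)
        = ( ((startsL tags ((m : Int) + 1)).zip ((startsL tags ((m : Int) + 1)).drop 1)).map
              (fun se => segL tags se.1 se.2),
            PySem.Dict.mk (segL tags s ((m : Int) + 1)) ) := by
  induction m with
  | zero =>
    have hr1 : PySem.List.pyRange 0 (((0:Nat):Int) + 1) = [0] := by
      rw [show ((0:Nat):Int) + 1 = 1 by norm_num,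
        PySem.List.pyRange_one_cons (by norm_num : (0:Int) < 1)]
      rw [show (0:Int) + 1 = 1 by norm_num, pyRange_nil (le_refl (1:Int))]
    have hst : startsL tags (((0:Nat):Int) + 1) = [0] := by
      rw [startsL, hr1]
      simp [List.filter]
    refine ⟨0, ?_, le_refl 0, by norm_num, ?_⟩
    · rw [hst]; rfl
    · rw [hr1, hst, List.foldl_cons, List.foldl_nil]
      have hs : stepA tags ([], PySem.Dict.empty) 0
          = ([], PySem.Dict.mk (segL tags 0 (0 + 1))) := by
        rw [stepA]
        simp only [BEq.rfl, if_true]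
        rw [show (PySem.List.pyGet? tags 0).getD "" = tagA tags 0 from rfl,
          empty_eq_segL tags 0, insert_segL tags (le_refl 0)]
      rw [hs]
      norm_num
  | succ m ih =>
    obtain ⟨s, hlast, hs0, hsle, hfold⟩ := ih
    have hcast : (((m+1:Nat)):Int) + 1 = ((m:Int) + 1) + 1 := by push_cast; ring
    rw [hcast]
    have hr : PySem.List.pyRange 0 (((m:Int) + 1) + 1)
        = PySem.List.pyRange 0 ((m:Int) + 1) ++ [(m:Int) + 1] :=
      PySem.List.pyRange_one_succ_right (by omega)
    have hstarts := startsL_succ tags (show (0:Int) < (m:Int) + 1 by omega)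
    have hstep := stepA_at tags
      ((((startsL tags ((m:Int)+1)).zip ((startsL tags ((m:Int)+1)).drop 1)).map
          (fun se => segL tags se.1 se.2)))
      (show (0:Int) < (m:Int) + 1 by omega) (show s < (m:Int) + 1 by omega)
    by_cases hc : contB tags ((m:Int) + 1) = true
    · refine ⟨s, ?_, hs0, by omega, ?_⟩
      · rw [hstarts, if_pos hc, List.append_nil, hlast]
      · rw [hr, List.foldl_append, hfold, List.foldl_cons, List.foldl_nil, hstep, if_pos hc,
          hstarts, if_pos hc, List.append_nil]
    · have hnil : startsL tags ((m:Int)+1) ≠ [] := by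
        intro h; rw [h] at hlast; simp at hlast
      refine ⟨(m:Int) + 1, ?_, by omega, by omega, ?_⟩
      · rw [hstarts, if_neg hc]
        simp
      · rw [hr, List.foldl_append, hfold, List.foldl_cons, List.foldl_nil, hstep, if_neg hc,
          hstarts, if_neg hc]
        have hdrop : ((startsL tags ((m:Int)+1) ++ [(m:Int)+1]).drop 1)
            = (startsL tags ((m:Int)+1)).drop 1 ++ [(m:Int)+1] :=
          List.drop_append_of_le_length (by
            cases h2 : startsL tags ((m:Int)+1) with
            | nil => exact absurd h2 hnil
            | cons a t => simp)
        rw [hdrop]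
        have hlen : (startsL tags ((m:Int)+1)).length
            = ((startsL tags ((m:Int)+1)).drop 1 ++ [(m:Int)+1]).length := by
          cases h2 : startsL tags ((m:Int)+1) with
          | nil => exact absurd h2 hnil
          | cons a t => simp
        have hz : (startsL tags ((m:Int)+1) ++ [(m:Int)+1]).zip
              ((startsL tags ((m:Int)+1)).drop 1 ++ [(m:Int)+1])
            = (startsL tags ((m:Int)+1)).zip ((startsL tags ((m:Int)+1)).drop 1 ++ [(m:Int)+1]) := by
          conv_lhs => rw [show (startsL tags ((m:Int)+1)).drop 1 ++ [(m:Int)+1]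
            = ((startsL tags ((m:Int)+1)).drop 1 ++ [(m:Int)+1]) ++ [] by simp]
          rw [List.zip_append hlen]
          simp
        rw [hz, zip_drop_snoc _ s _ hlast, List.map_append]
        rfl

theorem runA_eq_runB (tags : List String) : runA tags = runB tags := by
  rcases h : tags.length with _ | m
  · have h0 : (tags.length : Int) = 0 := by rw [h]; rfl
    simp only [runA, runB, h0]
    rw [pyRange_nil (le_refl (0:Int)), List.foldl_nil]
    rw [startsL, pyRange_nil (le_refl (0:Int))]
    simp
  · have h1 : (tags.length : Int) = (m : Int) + 1 := by rw [h]; push_cast; ring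
    simp only [runA, runB, h1]
    obtain ⟨s, hlast, hs0, hsle, hfold⟩ := invA tags m
    have hr : PySem.List.pyRange 0 ((m:Int) + 1)
        = PySem.List.pyRange 0 (m:Int) ++ [(m:Int)] := by
      have := PySem.List.pyRange_one_succ_right (by omega : (0:Int) ≤ (m:Int))
      exact this
    have hcong : List.foldl
        (fun st i => let st' := stepA tags st i
                     if i == ((m:Int)+1) - 1 then (st'.1 ++ [st'.2.items], st'.2) else st')
        ([], PySem.Dict.empty) (PySem.List.pyRange 0 (m:Int))
        = List.foldl (stepA tags) ([], PySem.Dict.empty) (PySem.List.pyRange 0 (m:Int)) := by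
      apply PySem.List.foldl_congr_mem
      intro acc x hx
      rw [PySem.List.mem_pyRange_one] at hx
      have hne : (x == ((m:Int)+1) - 1) = false := beq_eq_false_iff_ne.mpr (by omega)
      simp only [hne, Bool.false_eq_true, if_false]
    rw [hr, List.foldl_append, hcong, List.foldl_cons, List.foldl_nil]
    have hPm : stepA tags
        (List.foldl (stepA tags) ([], PySem.Dict.empty) (PySem.List.pyRange 0 (m:Int))) (m:Int)
        = ( ((startsL tags ((m:Int)+1)).zip ((startsL tags ((m:Int)+1)).drop 1)).map
              (fun se => segL tags se.1 se.2),
            PySem.Dict.mk (segL tags s ((m:Int) + 1)) ) := by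
      rw [hr, List.foldl_append, List.foldl_cons, List.foldl_nil] at hfold
      exact hfold
    have heq : ((m:Int) == ((m:Int)+1) - 1) = true := beq_iff_eq.mpr (by ring)
    simp only [hPm, heq, if_true]
    -- B side
    have hslice : PySem.List.slice (startsL tags ((m:Int)+1)) (some 1)
        = (startsL tags ((m:Int)+1)).drop 1 := by
      rw [PySem.List.slice_from _ (by norm_num : (0:Int) ≤ 1)]
      rfl
    rw [hslice]
    have hfun : (fun (se : Int × Int) => (((PySem.List.pyRange se.1 se.2).foldl
          (fun (d : PySem.Dict Int String) j => d.insert j (tagA tags j))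
          PySem.Dict.empty)).items)
        = fun se => segL tags se.1 se.2 := by
      funext se
      rw [dictfold_segL]
    rw [hfun, zip_drop_snoc _ s _ hlast, List.map_append]
    rfl

theorem conv2span_eq_runA (brown : List (String × String)) :
    conv2span brown = runA (brown.map (fun tup => tup.2)) := rfl

theorem conv2span_alt_eq_runB (brown : List (String × String)) :
    conv2span_alt brown = runB (brown.map (fun tup => tup.2)) := rfl

-- ===== VERDICT (by name: the statement is the Claim_ definition above) =====
theorem conv2span_spec : Claim_equal_conv2span := by
  intro brown _
  unfold Spec_conv2span
  rw [conv2span_eq_runA, conv2span_alt_eq_runB, runA_eq_runB]
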